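-- pv_equiv track=rewrite | github.com/ros3sz/Coding-Test | 프로그래머스/1/82612. 부족한 금액 계산하기/부족한 금액 계산하기.py | solution
-- ===== SOURCE A (Python) =====
-- def solution(price, money, count):
--     answer = -1
--     cost = sum((c * price) for c in range(count+1))
--     if cost >= money :
--         answer = cost - money
--     else :
--         answer = 0
--
--     return answer
-- ===== SOURCE B (Python) =====
-- def solution(price, money, count):
--     m = count if count > 0 else 0
--     cost = price * m * (m + 1) // 2
--     shortage = cost - money
--     return shortage if shortage > 0 else 0
-- ===== Notes on version B (the rewrite author's own statement) =====
-- stated objective: faster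
-- what changed: replaces the O(count) generator-sum over range(count+1) with the closed-form Gauss sum price*count*(count+1)//2
import Mathlib
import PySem

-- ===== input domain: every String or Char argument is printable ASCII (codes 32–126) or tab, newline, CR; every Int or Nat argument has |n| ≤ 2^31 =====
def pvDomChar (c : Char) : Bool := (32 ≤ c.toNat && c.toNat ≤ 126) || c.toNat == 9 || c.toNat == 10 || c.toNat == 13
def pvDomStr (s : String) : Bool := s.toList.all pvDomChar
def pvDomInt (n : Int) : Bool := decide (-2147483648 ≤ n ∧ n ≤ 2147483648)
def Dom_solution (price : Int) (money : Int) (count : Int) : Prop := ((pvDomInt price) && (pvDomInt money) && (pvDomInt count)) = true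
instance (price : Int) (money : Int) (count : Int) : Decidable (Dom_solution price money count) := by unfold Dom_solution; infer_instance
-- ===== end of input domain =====

-- B replaces A's O(count) sum over range(count+1) with the closed-form Gauss sum (objective: faster).

-- ===== PORT A =====
def solution (price : Int) (money : Int) (count : Int) : Int :=
  let cost := ((PySem.List.pyRange 0 (count + 1) 1).map (fun c => c * price)).sum
  if cost ≥ money then cost - money else 0

-- ===== PORT B =====
def solution_alt (price : Int) (money : Int) (count : Int) : Int :=
  let m := if count > 0 then count else 0
  let cost := PySem.Int.floordiv (price * m * (m + 1)) 2
  let shortage := cost - money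
  if shortage > 0 then shortage else 0

-- ===== PRECONDITION & SPEC =====
def Spec_solution (price : Int) (money : Int) (count : Int) (out : Int) : Prop := out = solution_alt price money count
instance (price : Int) (money : Int) (count : Int) (out : Int) : Decidable (Spec_solution price money count out) := by unfold Spec_solution; infer_instance

-- ===== CLAIM (what is proved, stated in full; the proofs are below) =====
def Claim_equal_solution : Prop := ∀ (price : Int) (money : Int) (count : Int), Dom_solution price money count → Spec_solution price money count (solution price money count)

-- ===== LEMMAS AND PROOFS =====

-- Gauss: twice the sum of k*price over range n equals price*(n-1)*n.
theorem pv_gauss (price : Int) : ∀ n : Nat,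
    (((List.range n).map (fun k : Nat => (k : Int) * price)).sum) * 2 = price * ((n : Int) - 1) * n := by
  intro n
  induction n with
  | zero => simp
  | succ n ih =>
    rw [List.range_succ, List.map_append, List.sum_append]
    push_cast
    simp only [List.map_cons, List.map_nil, List.sum_cons, List.sum_nil]
    linear_combination ih

theorem pv_floordiv_two_double (k : Int) : PySem.Int.floordiv (k * 2) 2 = k := by
  rw [PySem.Int.floordiv_eq_iff_of_pos (by norm_num)]
  omega

-- A's loop sum equals B's closed form for nonnegative count.
theorem pv_cost_eq (price count : Int) (h : 0 ≤ count) :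
    ((PySem.List.pyRange 0 (count + 1) 1).map (fun c => c * price)).sum
      = PySem.Int.floordiv (price * count * (count + 1)) 2 := by
  have hn : ((count.toNat + 1 : Nat) : Int) = count + 1 := by omega
  have hsum : ((PySem.List.pyRange 0 (count + 1) 1).map (fun c => c * price)).sum * 2
      = price * count * (count + 1) := by
    rw [PySem.List.pyRange_one]
    have := pv_gauss price (count.toNat + 1)
    simp only [List.map_map] at this ⊢
    have heq : ((fun c => c * price) ∘ fun k : Nat => (0 : Int) + k)
        = (fun k : Nat => (k : Int) * price) := by funext k; simp
    rw [show ((count + 1 : Int) - 0).toNat = count.toNat + 1 by omega, heq, this, hn]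
    ring
  rw [← hsum, pv_floordiv_two_double]

-- ===== VERDICT (by name: the statement is the Claim_ definition above) =====
theorem solution_spec : Claim_equal_solution := by
  intro price money count _
  unfold Spec_solution solution solution_alt
  rcases lt_trichotomy count 0 with h | h | h
  · -- count < 0: A's range is empty, B's m is 0
    rw [if_neg (by omega : ¬ count > 0),
      show PySem.List.pyRange 0 (count + 1) 1 = [] from
        PySem.List.pyRange_one_eq_nil (by omega)]
    simp only [List.map_nil, List.sum_nil]
    rw [show price * 0 * (0 + 1) = 0 * 2 by ring, pv_floordiv_two_double]
    split_ifs <;> omega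
  · -- count = 0
    subst h
    rw [if_neg (by omega : ¬ (0:Int) > 0), pv_cost_eq price 0 le_rfl]
    dsimp only
    rw [show price * 0 * (0 + 1) = 0 * 2 by ring, pv_floordiv_two_double]
    split_ifs <;> omega
  · -- count > 0: B's m is count; both costs are the same closed form
    rw [if_pos h, pv_cost_eq price count (le_of_lt h)]
    dsimp only
    set c := PySem.Int.floordiv (price * count * (count + 1)) 2 with hc
    split_ifs <;> omega
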